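-- pv_equiv track=rewrite | github.com/KIMHYUNSOO1999/BOJ_Algorithm | 프로그래머스/lv0/120815. 피자 나눠 먹기 （2）/피자 나눠 먹기 （2）.py | solution
-- ===== SOURCE A (Python) =====
-- def solution(n):
--     answer=1
--
--     while True:
--
--         tmp=answer*6
--
--         if tmp%n!=0:
--             answer+=1
--         else:
--             break
--
--     return answer
-- ===== SOURCE B (Python) =====
-- def solution(n):
--     # gcd of 6 and |n| by Euclid, then closed form |n| // gcd
--     a, b = 6, abs(n)
--     while b:
--         a, b = b, a % b
--     return abs(n) // a
-- ===== Notes on version B (the rewrite author's own statement) =====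
-- stated objective: faster
-- what changed: Replaced A's linear search (increment answer until 6*answer % n == 0) by the closed form abs(n) // gcd(6, abs(n)) with a Euclid gcd loop.
-- outside the precondition, e.g. on solution(0): A raises ZeroDivisionError, B returns 0
import Mathlib
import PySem

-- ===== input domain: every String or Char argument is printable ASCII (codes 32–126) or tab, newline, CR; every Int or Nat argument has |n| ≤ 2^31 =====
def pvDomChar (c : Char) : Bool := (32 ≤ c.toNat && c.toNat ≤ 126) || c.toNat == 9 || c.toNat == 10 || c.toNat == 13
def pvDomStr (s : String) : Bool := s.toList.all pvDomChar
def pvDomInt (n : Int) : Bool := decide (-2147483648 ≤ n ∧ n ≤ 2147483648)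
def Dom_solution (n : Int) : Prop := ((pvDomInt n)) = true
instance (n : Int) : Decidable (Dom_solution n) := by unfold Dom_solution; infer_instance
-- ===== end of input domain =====

-- B replaces A's linear count-up (try answer = 1, 2, … until 6*answer % n == 0) by the
-- closed form |n| // gcd(6, |n|) with a hand-written Euclid gcd loop (asymptotically faster).

-- ===== PORT A =====
-- A's `while True` loop; the fuel (n.natAbs + 1) only makes the recursion total:
-- for n ≠ 0 the loop always breaks with answer ≤ |n|, so the fuel is never exhausted.
def solutionLoop (n : Int) : Nat → Int → Int
  | 0, answer => answer
  | fuel + 1, answer =>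
    if PySem.Int.mod (answer * 6) n ≠ 0 then solutionLoop n fuel (answer + 1)
    else answer

def solution (n : Int) : Int := solutionLoop n (n.natAbs + 1) 1

-- ===== PORT B =====
-- `while b: a, b = b, a % b`
def gcdLoop (a b : Int) : Int :=
  if hb : b ≠ 0 then gcdLoop b (PySem.Int.mod a b) else a
termination_by b.natAbs
decreasing_by
  rcases lt_or_gt_of_ne hb with h | h
  · have h1 := (PySem.Int.mod_neg_bounds a h).1
    have h2 := (PySem.Int.mod_neg_bounds a h).2
    omega
  · have h1 := PySem.Int.mod_nonneg a h
    have h2 := PySem.Int.mod_lt a h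
    omega

def solution_alt (n : Int) : Int := PySem.Int.floordiv |n| (gcdLoop 6 |n|)

-- ===== PRECONDITION & SPEC =====
-- Pre_ excludes exactly n = 0, where A raises ZeroDivisionError.
def Pre_solution (n : Int) : Prop := n ≠ 0
instance (n : Int) : Decidable (Pre_solution n) := by unfold Pre_solution; infer_instance
def pvWitness_solution : Int := 7

def Spec_solution (n : Int) (out : Int) : Prop := out = solution_alt n
instance (n : Int) (out : Int) : Decidable (Spec_solution n out) := by unfold Spec_solution; infer_instance

-- ===== CLAIM (what is proved, stated in full; the proofs are below) =====
def Claim_equal_solution : Prop := ∀ (n : Int), Dom_solution n → Pre_solution n → Spec_solution n (solution n)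

-- ===== LEMMAS AND PROOFS =====

-- Euclid's loop on naturals computes Nat.gcd.
lemma gcdLoop_natCast : ∀ (b a : Nat), gcdLoop (a : Int) (b : Int) = (Nat.gcd a b : Int) := by
  intro b
  induction b using Nat.strong_induction_on with
  | _ b ih =>
    intro a
    rw [gcdLoop]
    by_cases hb : b = 0
    · subst hb; simp
    · have hbI : (b : Int) ≠ 0 := by exact_mod_cast hb
      rw [dif_pos hbI, PySem.Int.mod_natCast]
      rw [ih (a % b) (Nat.mod_lt a (Nat.pos_of_ne_zero hb))]
      congr 1
      rw [Nat.gcd_comm a b, Nat.gcd_rec b a, Nat.gcd_comm (a % b) b]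

-- A's loop returns k whenever k is the least positive multiple-index:
-- n ∣ 6*k, no smaller positive j works, and there is enough fuel.
lemma loop_eq (n : Int) (k : Nat) (hk : 1 ≤ k) (hdvd : n ∣ 6 * (k : Int))
    (hnd : ∀ j : Int, 1 ≤ j → j < (k : Int) → ¬ n ∣ 6 * j) :
    ∀ (fuel : Nat) (answer : Int), 1 ≤ answer → answer ≤ (k : Int) →
      (k : Int) - answer < (fuel : Int) → solutionLoop n fuel answer = (k : Int) := by
  intro fuel
  induction fuel with
  | zero => intro answer h1 h2 h3; exfalso; omega
  | succ fuel ih =>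
    intro answer h1 h2 h3
    rw [solutionLoop]
    by_cases heq : answer = (k : Int)
    · subst heq
      have : PySem.Int.mod ((k : Int) * 6) n = 0 := by
        rw [PySem.Int.mod_eq_zero_iff_dvd]
        have : (6 : Int) * k = (k : Int) * 6 := by ring
        rwa [this] at hdvd
      simp [this]
    · have hlt : answer < (k : Int) := lt_of_le_of_ne h2 heq
      have hmod : PySem.Int.mod (answer * 6) n ≠ 0 := by
        intro hzero
        rw [PySem.Int.mod_eq_zero_iff_dvd] at hzero
        exact hnd answer h1 hlt (by have h6 : (6 : Int) * answer = answer * 6 := by ring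
                                    rwa [h6])
      rw [if_pos hmod]
      exact ih (answer + 1) (by omega) (by omega) (by omega)

-- Characterisation: for n ≠ 0 the least positive k with n ∣ 6k is |n| / gcd(6, |n|).
lemma key_dvd (n : Int) (hn : n ≠ 0) :
    n ∣ 6 * ((n.natAbs / Nat.gcd 6 n.natAbs : Nat) : Int) := by
  have hgn : Nat.gcd 6 n.natAbs ∣ n.natAbs := Nat.gcd_dvd_right 6 n.natAbs
  have hg6 : Nat.gcd 6 n.natAbs ∣ 6 := Nat.gcd_dvd_left 6 n.natAbs
  have h1 : Nat.gcd 6 n.natAbs * (n.natAbs / Nat.gcd 6 n.natAbs) = n.natAbs :=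
    Nat.mul_div_cancel' hgn
  have h2 : 6 * (n.natAbs / Nat.gcd 6 n.natAbs) = (6 / Nat.gcd 6 n.natAbs) * n.natAbs := by
    calc 6 * (n.natAbs / Nat.gcd 6 n.natAbs)
        = (6 / Nat.gcd 6 n.natAbs * Nat.gcd 6 n.natAbs) * (n.natAbs / Nat.gcd 6 n.natAbs) := by
          rw [Nat.div_mul_cancel hg6]
      _ = (6 / Nat.gcd 6 n.natAbs) * (Nat.gcd 6 n.natAbs * (n.natAbs / Nat.gcd 6 n.natAbs)) := by
          ring
      _ = (6 / Nat.gcd 6 n.natAbs) * n.natAbs := by rw [h1]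
  have hNat : n.natAbs ∣ 6 * (n.natAbs / Nat.gcd 6 n.natAbs) := by
    rw [h2]; exact dvd_mul_left n.natAbs (6 / Nat.gcd 6 n.natAbs)
  have h3 := Int.natCast_dvd_natCast.mpr hNat
  rw [Int.natAbs_dvd] at h3
  exact_mod_cast h3

lemma key_not_dvd (n : Int) (hn : n ≠ 0) :
    ∀ j : Int, 1 ≤ j → j < ((n.natAbs / Nat.gcd 6 n.natAbs : Nat) : Int) → ¬ n ∣ 6 * j := by
  intro j hj1 hjk hdvd
  have hgpos : 0 < Nat.gcd 6 n.natAbs := Nat.gcd_pos_of_pos_left _ (by norm_num)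
  have hgn : Nat.gcd 6 n.natAbs ∣ n.natAbs := Nat.gcd_dvd_right 6 n.natAbs
  have hg6 : Nat.gcd 6 n.natAbs ∣ 6 := Nat.gcd_dvd_left 6 n.natAbs
  obtain ⟨jn, rfl⟩ : ∃ jn : Nat, j = (jn : Int) := ⟨j.toNat, by omega⟩
  have hNat : n.natAbs ∣ 6 * jn := by
    rw [← Int.natAbs_dvd] at hdvd
    exact_mod_cast hdvd
  -- write 6 = g * m, |n| = g * k, with m, k coprime after dividing by the gcd
  have h6 : Nat.gcd 6 n.natAbs * (6 / Nat.gcd 6 n.natAbs) = 6 := Nat.mul_div_cancel' hg6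
  have hN : Nat.gcd 6 n.natAbs * (n.natAbs / Nat.gcd 6 n.natAbs) = n.natAbs :=
    Nat.mul_div_cancel' hgn
  have hdvd2 : Nat.gcd 6 n.natAbs * (n.natAbs / Nat.gcd 6 n.natAbs) ∣
      Nat.gcd 6 n.natAbs * ((6 / Nat.gcd 6 n.natAbs) * jn) := by
    rw [hN, ← Nat.mul_assoc, h6]; exact hNat
  have hk_dvd : n.natAbs / Nat.gcd 6 n.natAbs ∣ (6 / Nat.gcd 6 n.natAbs) * jn :=
    (Nat.mul_dvd_mul_iff_left hgpos).mp hdvd2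
  have hcop : Nat.Coprime (6 / Nat.gcd 6 n.natAbs) (n.natAbs / Nat.gcd 6 n.natAbs) :=
    Nat.coprime_div_gcd_div_gcd hgpos
  have hkj : n.natAbs / Nat.gcd 6 n.natAbs ∣ jn :=
    (Nat.Coprime.dvd_of_dvd_mul_left hcop.symm) hk_dvd
  have hle : n.natAbs / Nat.gcd 6 n.natAbs ≤ jn := Nat.le_of_dvd (by omega) hkj
  have hlt2 : jn < n.natAbs / Nat.gcd 6 n.natAbs := by exact_mod_cast hjk
  exact Nat.lt_irrefl _ (Nat.lt_of_lt_of_le hlt2 hle)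

theorem solution_spec : Claim_equal_solution := by
  intro n _ hn
  have hn' : n ≠ 0 := hn
  have hpos : 0 < n.natAbs := Int.natAbs_pos.mpr hn'
  have hgpos : 0 < Nat.gcd 6 n.natAbs := Nat.gcd_pos_of_pos_left _ (by norm_num)
  have hgle : Nat.gcd 6 n.natAbs ≤ n.natAbs :=
    Nat.le_of_dvd hpos (Nat.gcd_dvd_right 6 n.natAbs)
  have hk1 : 1 ≤ n.natAbs / Nat.gcd 6 n.natAbs := Nat.div_pos hgle hgpos
  have hkle : n.natAbs / Nat.gcd 6 n.natAbs ≤ n.natAbs := Nat.div_le_self _ _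
  unfold Spec_solution solution solution_alt
  have hA : solutionLoop n (n.natAbs + 1) 1 = ((n.natAbs / Nat.gcd 6 n.natAbs : Nat) : Int) :=
    loop_eq n (n.natAbs / Nat.gcd 6 n.natAbs) hk1 (key_dvd n hn') (key_not_dvd n hn')
      (n.natAbs + 1) 1 (by omega) (by exact_mod_cast hk1)
      (by have hc : ((n.natAbs / Nat.gcd 6 n.natAbs : Nat) : Int) ≤ (n.natAbs : Int) :=
            Int.ofNat_le.mpr hkle
          push_cast
          linarith)
  have habs : |n| = ((n.natAbs : Nat) : Int) := Int.abs_eq_natAbs n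
  have hgcd : gcdLoop 6 |n| = ((Nat.gcd 6 n.natAbs : Nat) : Int) := by
    rw [habs]
    have : (6 : Int) = ((6 : Nat) : Int) := by norm_num
    rw [this, gcdLoop_natCast]
  rw [hA, hgcd, habs, PySem.Int.floordiv_natCast]
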